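-- pv_equiv track=rewrite | github.com/liamellison02/dsa-solutions | codepath/tip102/wk2/session2/advanced/p3.py | organize_exhibition
-- ===== SOURCE A (Python) =====
-- from collections import Counter
--
-- def organize_exhibition(collection):
--     cnt = Counter(collection)
--     ret = [[] for _ in range(max(cnt.values()))]
--     for p,c in cnt.items():
--         while c > 0:
--             ret[c-1].append(p)
--             c-=1
--     return ret
-- ===== SOURCE B (Python) =====
-- from collections import Counter
--
-- def organize_exhibition(collection):
--     cnt = Counter(collection)
--     rows = []
--     alive = list(cnt.items())
--     for i in range(max(cnt.values())):
--         alive = [pc for pc in alive if pc[1] >= i + 1]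
--         rows.append([p for p, _ in alive])
--     return rows
-- ===== Notes on version B (the rewrite author's own statement) =====
-- stated objective: alternative
-- what changed: B transposes the traversal: instead of looping over paintings and counting each one down into preallocated rows, it sweeps row levels bottom-up, keeping the list of still-alive (count >= level) paintings and emitting it as each row.
import Mathlib
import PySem

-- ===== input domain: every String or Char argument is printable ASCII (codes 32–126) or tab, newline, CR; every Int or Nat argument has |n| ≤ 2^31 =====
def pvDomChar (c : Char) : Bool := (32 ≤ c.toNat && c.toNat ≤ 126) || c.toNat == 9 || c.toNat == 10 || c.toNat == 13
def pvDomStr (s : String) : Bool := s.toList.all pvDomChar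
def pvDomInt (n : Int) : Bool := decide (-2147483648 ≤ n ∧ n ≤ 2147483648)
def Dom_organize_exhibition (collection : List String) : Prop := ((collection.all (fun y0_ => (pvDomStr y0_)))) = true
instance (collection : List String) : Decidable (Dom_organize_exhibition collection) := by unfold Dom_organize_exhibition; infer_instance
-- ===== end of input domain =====

-- B iterates over row levels and builds each row as the paintings whose count reaches that
-- level, instead of A's per-painting countdown loop; same return value on non-empty input.


-- ===== PORT A =====
-- 'while c > 0: ret[c-1].append(p); c -= 1' — ret[c-1] is always in range when A runs
-- (c ≤ max of counts = len(ret)), so the total pyGetD/pySetD forms are exact there.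
def pvAppendLoop (ret : List (List String)) (p : String) (c : Int) : List (List String) :=
  if 0 < c then
    pvAppendLoop (PySem.List.pySetD ret (c - 1) (PySem.List.pyGetD ret (c - 1) [] ++ [p])) p (c - 1)
  else ret
termination_by c.toNat
decreasing_by omega

def organize_exhibition (collection : List String) : List (List String) :=
  let cnt := PySem.Dict.counter collection
  match PySem.List.max? cnt.values (fun v => v) with
  | none => []   -- max() of an empty sequence: ValueError, excluded by Pre_
  | some m =>
    cnt.items.foldl (fun ret pc => pvAppendLoop ret pc.1 pc.2)
      ((PySem.List.pyRange 0 m 1).map (fun _ => []))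

-- ===== PORT B =====
-- one level of the sweep: 'alive = [pc for pc in alive if pc[1] >= i + 1]; rows.append([p for p, _ in alive])'
def pvLevelStep (st : List (String × Int) × List (List String)) (i : Int) :
    List (String × Int) × List (List String) :=
  let alive := st.1.filter (fun pc => decide (pc.2 ≥ i + 1))
  (alive, st.2 ++ [alive.map Prod.fst])

def organize_exhibition_alt (collection : List String) : List (List String) :=
  let cnt := PySem.Dict.counter collection
  match PySem.List.max? cnt.values (fun v => v) with
  | none => []   -- max() of an empty sequence: ValueError, excluded by Pre_
  | some m =>
    ((PySem.List.pyRange 0 m 1).foldl pvLevelStep (cnt.items, [])).2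

-- ===== PRECONDITION & SPEC =====
-- A (and B) raise ValueError on the empty list (max() of an empty sequence); nothing else raises.
def Pre_organize_exhibition (collection : List String) : Prop := collection ≠ []
instance (collection : List String) : Decidable (Pre_organize_exhibition collection) := by unfold Pre_organize_exhibition; infer_instance
def pvWitness_organize_exhibition : List String := (["a", "b", "a"])

def Spec_organize_exhibition (collection : List String) (out : List (List String)) : Prop := out = organize_exhibition_alt collection
instance (collection : List String) (out : List (List String)) : Decidable (Spec_organize_exhibition collection out) := by unfold Spec_organize_exhibition; infer_instance

-- ===== CLAIM (what is proved, stated in full; the proofs are below) =====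
def Claim_equal_organize_exhibition : Prop := ∀ (collection : List String), Dom_organize_exhibition collection → Pre_organize_exhibition collection → Spec_organize_exhibition collection (organize_exhibition collection)

-- ===== LEMMAS AND PROOFS =====

theorem pvAppendLoop_length (ret : List (List String)) (p : String) (c : Int) :
    (pvAppendLoop ret p c).length = ret.length := by
  generalize hn : c.toNat = n
  induction n generalizing ret c with
  | zero => rw [pvAppendLoop, if_neg (by omega)]
  | succ n ih =>
    rw [pvAppendLoop, if_pos (by omega : 0 < c)]
    rw [ih _ _ (by omega), PySem.List.length_pySetD]

theorem pvAppendLoop_getElem? (ret : List (List String)) (p : String) (c : Int)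
    (hc : c ≤ (ret.length : Int)) (j : Nat) :
    (pvAppendLoop ret p c)[j]? =
      if (j : Int) < c then ret[j]?.map (· ++ [p]) else ret[j]? := by
  generalize hn : c.toNat = n
  induction n generalizing ret c with
  | zero =>
    rw [pvAppendLoop, if_neg (by omega), if_neg (by omega)]
  | succ n ih =>
    rw [pvAppendLoop, if_pos (by omega : 0 < c)]
    have hlen : (c - 1).toNat < ret.length := by omega
    rw [ih _ _ (by rw [PySem.List.length_pySetD]; omega) (by omega),
        PySem.List.pySetD_of_nonneg ret (i := c - 1) _ (by omega),
        PySem.List.pyGetD_eq_getElem ret (i := c - 1) [] (by omega) (by omega)]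
    rw [List.getElem?_set]
    by_cases hj : (c - 1).toNat = j
    · simp [show c.toNat - 1 = j from by omega, show (j : Int) < c from by omega,
        show ¬((j : Int) < c - 1) from by omega, show j < ret.length from by omega]
    · have heq : ((j : Int) < c - 1) ↔ ((j : Int) < c) := by omega
      simp [show ¬ (c.toNat - 1 = j) from by omega, heq]

theorem pvFold_getElem? (L : List (String × Int)) (init : List (List String))
    (h : ∀ pc ∈ L, pc.2 ≤ (init.length : Int)) (j : Nat) :
    (L.foldl (fun ret pc => pvAppendLoop ret pc.1 pc.2) init)[j]? =
      init[j]?.map (fun row => row ++ (L.filter (fun pc => decide ((j : Int) < pc.2))).map Prod.fst) := by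
  induction L generalizing init with
  | nil => simp
  | cons pc L ih =>
    simp only [List.foldl_cons]
    rw [ih _ (fun q hq => by rw [pvAppendLoop_length]; exact h q (List.mem_cons_of_mem _ hq)),
        pvAppendLoop_getElem? _ _ _ (h pc (List.mem_cons_self ..))]
    by_cases hj : (j : Int) < pc.2
    · simp [hj, Option.map_map, Function.comp_def]
    · simp [hj]

theorem pvRows_getElem? (collection : List String) (m : Int)
    (hm : PySem.List.max? (PySem.Dict.counter collection).values (fun v => v) = some m) (j : Nat) :
    ((PySem.Dict.counter collection).items.foldl (fun ret pc => pvAppendLoop ret pc.1 pc.2)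
        ((PySem.List.pyRange 0 m 1).map (fun _ => [])))[j]? =
      if j < m.toNat then
        some (((PySem.Dict.counter collection).items.filter
          (fun pc => decide ((j : Int) < pc.2))).map Prod.fst)
      else none := by
  have hmax : ∀ pc ∈ (PySem.Dict.counter collection).items,
      pc.2 ≤ ((((PySem.List.pyRange 0 m 1).map (fun _ => ([] : List String))).length : Int)) := by
    intro pc hpc
    have hv : pc.2 ∈ (PySem.Dict.counter collection).values := by
      simp only [PySem.Dict.values]
      exact List.mem_map_of_mem hpc
    have hle := PySem.List.max?_isMax hm _ hv
    simp only [List.length_map, PySem.List.length_pyRange_one]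
    omega
  rw [pvFold_getElem? _ _ hmax j]
  rw [List.getElem?_map, PySem.List.getElem?_pyRange_one]
  simp only [sub_zero]
  by_cases hj : j < m.toNat
  · simp [hj]
  · simp [hj]

theorem pvLevels_snd (L : List (String × Int)) (a b : Int) (acc : List (List String)) :
    ((PySem.List.pyRange a b 1).foldl pvLevelStep (L, acc)).2 =
      acc ++ (PySem.List.pyRange a b 1).map
        (fun i => (L.filter (fun pc => decide (pc.2 ≥ i + 1))).map Prod.fst) := by
  generalize hn : (b - a).toNat = n
  induction n generalizing L a acc with
  | zero =>
    rw [PySem.List.pyRange_one_eq_nil (by omega)]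
    simp
  | succ n ih =>
    have hab : a < b := by omega
    rw [PySem.List.pyRange_one_cons hab]
    simp only [List.foldl_cons, List.map_cons, pvLevelStep]
    rw [ih _ _ _ (by omega)]
    simp only [List.append_assoc, List.singleton_append]
    congr 2
    apply List.map_congr_left
    intro i hi
    rw [PySem.List.mem_pyRange_one] at hi
    congr 1
    rw [List.filter_filter]
    apply List.filter_congr
    intro pc _
    simp only [← Bool.decide_and, decide_eq_decide]
    omega

-- ===== VERDICT (by name: the statement is the Claim_ definition above) =====
theorem organize_exhibition_spec : Claim_equal_organize_exhibition := by
  intro collection _ _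
  unfold Spec_organize_exhibition organize_exhibition organize_exhibition_alt
  cases hm : PySem.List.max? (PySem.Dict.counter collection).values (fun v => v) with
  | none => simp only [hm]
  | some m =>
    simp only [hm]
    rw [pvLevels_snd, List.nil_append]
    apply List.ext_getElem?
    intro j
    rw [pvRows_getElem? collection m hm j]
    rw [List.getElem?_map, PySem.List.getElem?_pyRange_one]
    simp only [sub_zero, zero_add]
    by_cases hj : j < m.toNat
    · rw [if_pos hj, if_pos hj]
      simp only [Option.map_some, Option.some.injEq]
      exact congrArg (List.map Prod.fst)
        (List.filter_congr (fun pc _ => by simp only [decide_eq_decide]; omega))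
    · rw [if_neg hj, if_neg hj]
      rfl
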